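-- pv_equiv track=rewrite | github.com/ntnhan0605/docs-ntnhan0605 | Algorithm/BigO - Green 60/Lecture 05 - Practice/fruits.py | fruits
-- ===== SOURCE A (Python) =====
-- def fruits(a, b):
-- 	index = 0
-- 	for i in range(1, len(a)):
-- 		if a[i] > a[index]:
-- 			index = i
-- 		elif a[i] == a[index]:
-- 			if b[i] > b[index]:
-- 				index = i
-- 	return index
-- ===== SOURCE B (Python) =====
-- def fruits(a, b):
--     if not a:
--         return 0
--     m = max(a)
--     return max((i for i in range(len(a)) if a[i] == m), key=lambda i: b[i])
-- ===== Notes on version B (the rewrite author's own statement) =====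
-- stated objective: alternative
-- what changed: Replaces the single interleaved running-argmax scan with two separate passes: first compute m = max(a), then pick with max(..., key=...) the earliest index among the positions where a attains m that maximizes b.
-- outside the precondition, e.g. on fruits([1, 2], [0]): A returns 1, B raises IndexError; on fruits([5], []): A returns 0, B raises IndexError
import Mathlib
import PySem

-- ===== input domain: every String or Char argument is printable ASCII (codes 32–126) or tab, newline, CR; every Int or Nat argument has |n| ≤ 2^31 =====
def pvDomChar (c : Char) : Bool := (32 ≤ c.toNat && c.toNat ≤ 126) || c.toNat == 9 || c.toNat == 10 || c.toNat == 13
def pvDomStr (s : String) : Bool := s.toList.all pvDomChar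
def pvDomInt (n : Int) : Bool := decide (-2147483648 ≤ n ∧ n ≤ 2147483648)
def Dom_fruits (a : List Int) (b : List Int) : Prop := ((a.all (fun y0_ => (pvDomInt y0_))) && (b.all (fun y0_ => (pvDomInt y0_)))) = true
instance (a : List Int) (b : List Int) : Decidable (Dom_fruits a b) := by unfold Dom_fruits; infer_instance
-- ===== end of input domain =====

-- B replaces A's single interleaved running-argmax scan by two passes: max(a) first, then
-- a first-extremal max over the max positions keyed by b (objective: alternative decomposition).


-- ===== PORT A =====
-- a[i]/b[i] are ported as pyGetD _ _ 0; Python raises there only on indices out of range,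
-- which Pre_fruits excludes (all indices touched are < a.length ≤ b.length inside Pre_).
def fruitsStep (a : List Int) (b : List Int) (index : Int) (i : Int) : Int :=
  if PySem.List.pyGetD a i 0 > PySem.List.pyGetD a index 0 then i
  else if PySem.List.pyGetD a i 0 = PySem.List.pyGetD a index 0 then
    (if PySem.List.pyGetD b i 0 > PySem.List.pyGetD b index 0 then i else index)
  else index

def fruits (a : List Int) (b : List Int) : Int :=
  (PySem.List.pyRange 1 (a.length : Int) 1).foldl (fruitsStep a b) 0

-- ===== PORT B =====
def fruits_alt (a : List Int) (b : List Int) : Int :=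
  if a = [] then 0
  else
    let m := (PySem.List.max? a (fun x => x)).getD 0
    ((PySem.List.max?
        ((PySem.List.pyRange 0 (a.length : Int) 1).filter
          (fun i => PySem.List.pyGetD a i 0 == m))
        (fun i => PySem.List.pyGetD b i 0)).getD 0)

-- ===== PRECONDITION & SPEC =====
-- Pre_ excludes pairs where b is shorter than a: there indexing b can raise IndexError
-- (A whenever its running maximum ties at an index outside b, B whenever a position of
-- max(a) lies outside b); on such pairs each Python may raise instead of returning.
def Pre_fruits (a : List Int) (b : List Int) : Prop := a.length ≤ b.length
instance (a : List Int) (b : List Int) : Decidable (Pre_fruits a b) := by unfold Pre_fruits; infer_instance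
def pvWitness_fruits : List Int × List Int := ([3, 1, 3], [5, 0, 7])
def Spec_fruits (a : List Int) (b : List Int) (out : Int) : Prop := out = fruits_alt a b
instance (a : List Int) (b : List Int) (out : Int) : Decidable (Spec_fruits a b out) := by unfold Spec_fruits; infer_instance

-- ===== CLAIM (what is proved, stated in full; the proofs are below) =====
def Claim_equal_fruits : Prop := ∀ (a : List Int) (b : List Int), Dom_fruits a b → Pre_fruits a b → Spec_fruits a b (fruits a b)

-- ===== LEMMAS AND PROOFS =====

-- the characterisation both ports satisfy: idx = ↑j where j < k is a maximum position of
-- a[0:k], has the largest b among tying maximum positions, and is the earliest such.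
def GoodIdx (a : List Int) (b : List Int) (k : Nat) (idx : Int) : Prop :=
  ∃ j : Nat, idx = (j : Int) ∧ j < k ∧
    (∀ t, t < k → a.getD t 0 ≤ a.getD j 0) ∧
    (∀ t, t < k → a.getD t 0 = a.getD j 0 → b.getD t 0 ≤ b.getD j 0) ∧
    (∀ t, t < j → a.getD t 0 = a.getD j 0 → b.getD t 0 < b.getD j 0)

lemma goodIdx_unique {a b : List Int} {k : Nat} {x y : Int}
    (hx : GoodIdx a b k x) (hy : GoodIdx a b k y) : x = y := by
  obtain ⟨j1, rfl, hj1, hmax1, htie1, hfst1⟩ := hx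
  obtain ⟨j2, rfl, hj2, hmax2, htie2, hfst2⟩ := hy
  have ha : a.getD j1 0 = a.getD j2 0 :=
    le_antisymm (hmax2 j1 hj1) (hmax1 j2 hj2)
  have hb : b.getD j1 0 = b.getD j2 0 :=
    le_antisymm (htie2 j1 hj1 ha) (htie1 j2 hj2 ha.symm)
  rcases lt_trichotomy j1 j2 with h | h | h
  · exact absurd hb (ne_of_lt (hfst2 j1 h ha))
  · exact congrArg _ h
  · exact absurd hb.symm (ne_of_lt (hfst1 j2 h ha.symm))

-- A's loop maintains GoodIdx on the scanned prefix.
lemma fruits_inv (a b : List Int) :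
    ∀ k : Nat, 1 ≤ k → GoodIdx a b k ((PySem.List.pyRange 1 (k : Int) 1).foldl (fruitsStep a b) 0) := by
  intro k hk
  induction k with
  | zero => omega
  | succ k ih =>
    by_cases hk1 : 1 ≤ k
    · have hcast : ((k + 1 : Nat) : Int) = (k : Int) + 1 := by push_cast; ring
      rw [hcast, PySem.List.pyRange_one_succ_right (by exact_mod_cast hk1), List.foldl_append]
      obtain ⟨j, hj, hjk, hmax, htie, hfst⟩ := ih hk1
      simp only [List.foldl_cons, List.foldl_nil, hj]
      unfold fruitsStep
      rw [PySem.List.pyGetD_natCast, PySem.List.pyGetD_natCast,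
          PySem.List.pyGetD_natCast, PySem.List.pyGetD_natCast]
      by_cases h1 : a.getD k 0 > a.getD j 0
      · simp only [h1, if_pos]
        refine ⟨k, rfl, by omega, ?_, ?_, ?_⟩
        · intro t ht
          by_cases htk : t < k
          · exact le_of_lt (lt_of_le_of_lt (hmax t htk) h1)
          · have : t = k := by omega
            simp [this]
        · intro t ht heq
          by_cases htk : t < k
          · exact absurd heq (ne_of_lt (lt_of_le_of_lt (hmax t htk) h1))
          · have : t = k := by omega
            simp [this]
        · intro t ht heq
          exact absurd heq (ne_of_lt (lt_of_le_of_lt (hmax t ht) h1))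
      · simp only [h1]
        by_cases h2 : a.getD k 0 = a.getD j 0
        · simp only [h2]
          by_cases h3 : b.getD k 0 > b.getD j 0
          · simp only [h3, if_pos]
            refine ⟨k, rfl, by omega, ?_, ?_, ?_⟩
            · intro t ht
              by_cases htk : t < k
              · exact (hmax t htk).trans (le_of_eq h2.symm)
              · have : t = k := by omega
                simp [this]
            · intro t ht heq
              by_cases htk : t < k
              · exact le_of_lt (lt_of_le_of_lt (htie t htk (heq.trans h2)) h3)
              · have : t = k := by omega
                simp [this]
            · intro t ht heq
              exact lt_of_le_of_lt (htie t ht (heq.trans h2)) h3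
          · simp only [h3]
            refine ⟨j, rfl, by omega, ?_, ?_, hfst⟩
            · intro t ht
              by_cases htk : t < k
              · exact hmax t htk
              · have : t = k := by omega
                simpa [this] using le_of_eq h2
            · intro t ht heq
              by_cases htk : t < k
              · exact htie t htk heq
              · have : t = k := by omega
                subst this; omega
        · have h1' : a.getD k 0 < a.getD j 0 := by omega
          simp only [if_neg h2]
          refine ⟨j, rfl, by omega, ?_, ?_, hfst⟩
          · intro t ht
            by_cases htk : t < k
            · exact hmax t htk
            · have : t = k := by omega
              subst this; exact le_of_lt h1'
          · intro t ht heq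
            by_cases htk : t < k
            · exact htie t htk heq
            · have : t = k := by omega
              subst this; exact absurd heq (ne_of_lt h1')
    · have : k = 0 := by omega
      subst this
      simp only [PySem.List.pyRange]
      refine ⟨0, by norm_num, by omega, ?_, ?_, ?_⟩ <;> intro t ht <;> first | omega | (interval_cases t; simp)

lemma fruits_goodIdx {a b : List Int} (h : a ≠ []) :
    GoodIdx a b a.length (fruits a b) := by
  unfold fruits
  exact fruits_inv a b a.length (by cases a with | nil => exact absurd rfl h | cons x t => simp)

-- max? on a cons is the running max of its tail.
lemma max?_cons_eq {α : Type} (key : α → Int) (c : α) (t : List α) :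
    PySem.List.max? (c :: t) key
      = some (t.foldl (fun m x => if key m < key x then x else m) c) := by
  unfold PySem.List.max?
  simp only [List.foldl_cons]
  induction t generalizing c with
  | nil => rfl
  | cons x t ih =>
    simp only [List.foldl_cons]
    by_cases h : key c < key x <;> simp [h, ih]

-- the running max over a strictly increasing list of Ints keyed by `key` is the FIRST
-- extremal element: every strictly earlier element has a strictly smaller key.
lemma maxRun_first (key : Int → Int) :
    ∀ (t : List Int) (m : Int), t.Pairwise (· < ·) → (∀ y ∈ t, m < y) →
      (t.foldl (fun acc x => if key acc < key x then x else acc) m) ∈ m :: t ∧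
      (∀ y ∈ m :: t, key y ≤ key (t.foldl (fun acc x => if key acc < key x then x else acc) m)) ∧
      (∀ y ∈ m :: t, y < t.foldl (fun acc x => if key acc < key x then x else acc) m →
        key y < key (t.foldl (fun acc x => if key acc < key x then x else acc) m)) := by
  intro t
  induction t with
  | nil => simp
  | cons x t ih =>
    intro m hpw hlt
    have hx : m < x := hlt x (by simp)
    have hpw' := (List.pairwise_cons.mp hpw)
    simp only [List.foldl_cons]
    by_cases h : key m < key x
    · simp only [h, if_pos]
      obtain ⟨hmem, hmax, hfst⟩ := ih x hpw'.2 hpw'.1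
      refine ⟨by simpa using Or.inr hmem, ?_, ?_⟩
      · intro y hy
        rcases List.mem_cons.mp hy with rfl | hy'
        · exact le_of_lt (lt_of_lt_of_le h (hmax x (by simp)))
        · exact hmax y hy'
      · intro y hy hylt
        rcases List.mem_cons.mp hy with rfl | hy'
        · exact lt_of_lt_of_le h (hmax x (by simp))
        · exact hfst y hy' hylt
    · simp only [if_neg h]
      have hlt' : ∀ y ∈ t, m < y := fun y hy => lt_trans hx (hpw'.1 y hy)
      obtain ⟨hmem, hmax, hfst⟩ := ih m hpw'.2 hlt'
      have hxkey : key x ≤ key m := by omega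
      refine ⟨?_, ?_, ?_⟩
      · rcases List.mem_cons.mp hmem with h' | h' <;> simp [h']
      · intro y hy
        rcases List.mem_cons.mp hy with rfl | hy'
        · exact hmax y (by simp)
        · rcases List.mem_cons.mp hy' with rfl | hy''
          · exact hxkey.trans (hmax m (by simp))
          · exact hmax y (by simp [hy''])
      · intro y hy hylt
        rcases List.mem_cons.mp hy with rfl | hy'
        · exact hfst y (by simp) hylt
        · rcases List.mem_cons.mp hy' with rfl | hy''
          · -- y = x; the result is then an element of t, strictly above m
            have hrt : List.foldl (fun acc x => if key acc < key x then x else acc) m t ∈ t := by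
              rcases List.mem_cons.mp hmem with h' | h'
              · exact absurd (h' ▸ hylt) (by omega)
              · exact h'
            have hmr : m < List.foldl (fun acc x => if key acc < key x then x else acc) m t :=
              hlt' _ hrt
            exact lt_of_le_of_lt hxkey (hfst m (by simp) hmr)
          · exact hfst y (by simp [hy'']) hylt

lemma fruits_alt_goodIdx {a b : List Int} (h : a ≠ []) :
    GoodIdx a b a.length (fruits_alt a b) := by
  obtain ⟨x, t, rfl⟩ := List.exists_cons_of_ne_nil h
  set a := x :: t with ha
  set n := a.length with hn
  set m : Int := t.foldl max x with hm
  have hmaxa : PySem.List.max? a (fun x => x) = some m := PySem.List.max?_id_cons x t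
  have hmle : ∀ y ∈ a, y ≤ m := by
    intro y hy
    rcases List.mem_cons.mp hy with rfl | hy'
    · exact (PySem.List.le_foldl_max t y).1
    · exact (PySem.List.le_foldl_max t x).2 y hy'
  have hmmem : m ∈ a := by
    rcases PySem.List.foldl_max_mem t x with h' | h'
    · rw [hm, h']; exact List.mem_cons_self
    · exact List.mem_cons_of_mem x h'
  set cs : List Int := (PySem.List.pyRange 0 (n : Int) 1).filter
      (fun i => PySem.List.pyGetD a i 0 == m) with hcs
  have hmemcs : ∀ i : Int, i ∈ cs ↔ ∃ u : Nat, u < n ∧ i = (u : Int) ∧ a.getD u 0 = m := by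
    intro i
    rw [hcs, PySem.List.pyRange_zero_natCast, List.mem_filter]
    constructor
    · rintro ⟨hi, hp⟩
      obtain ⟨u, hu, rfl⟩ := List.mem_map.mp hi
      refine ⟨u, List.mem_range.mp hu, rfl, ?_⟩
      rw [PySem.List.pyGetD_natCast, beq_iff_eq] at hp
      exact hp
    · rintro ⟨u, hu, rfl, hgd⟩
      refine ⟨List.mem_map.mpr ⟨u, List.mem_range.mpr hu, rfl⟩, ?_⟩
      rw [PySem.List.pyGetD_natCast]
      exact beq_iff_eq.mpr hgd
  have hpw : cs.Pairwise (· < ·) := by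
    rw [hcs, PySem.List.pyRange_zero_natCast]
    exact List.Pairwise.filter _ (List.pairwise_map.mpr (by
      exact List.pairwise_lt_range.imp (by intro u v huv; exact_mod_cast huv)))
  have hne : cs ≠ [] := by
    obtain ⟨u, hu, hgu⟩ := List.mem_iff_getElem.mp hmmem
    intro hnil
    have : (u : Int) ∈ cs := (hmemcs _).mpr ⟨u, hu, rfl, by rw [List.getD_eq_getElem a 0 hu, hgu]⟩
    simp [hnil] at this
  obtain ⟨c, rest, hcr⟩ := List.exists_cons_of_ne_nil hne
  have hpw' := List.pairwise_cons.mp (hcr ▸ hpw)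
  set key : Int → Int := fun i => PySem.List.pyGetD b i 0 with hkey
  set r : Int := rest.foldl (fun acc x => if key acc < key x then x else acc) c with hr
  obtain ⟨hrmem, hrmax, hrfst⟩ := maxRun_first key rest c hpw'.2 hpw'.1
  have hrmem' : r ∈ cs := hcr ▸ hrmem
  have hrmax' : ∀ y ∈ cs, key y ≤ key r := by rw [hcr]; exact hrmax
  have hrfst' : ∀ y ∈ cs, y < r → key y < key r := by rw [hcr]; exact hrfst
  have halt : fruits_alt a b = r := by
    rw [fruits_alt, if_neg (by simp [ha]), hmaxa]
    simp only [Option.getD_some]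
    rw [← hn, ← hcs, hcr, max?_cons_eq, Option.getD_some, hr]
  obtain ⟨j, hjn, hje, hgj⟩ := (hmemcs r).mp hrmem'
  rw [halt, hje]
  refine ⟨j, rfl, hjn, ?_, ?_, ?_⟩
  · intro u hu
    rw [hgj, List.getD_eq_getElem a 0 hu]
    exact hmle _ (List.getElem_mem hu)
  · intro u hu heq
    have hu' : (u : Int) ∈ cs := (hmemcs _).mpr ⟨u, hu, rfl, heq.trans hgj⟩
    have := hrmax' _ hu'
    rw [hje] at this
    simpa [hkey, PySem.List.pyGetD_natCast] using this
  · intro u hu heq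
    have hu' : (u : Int) ∈ cs := (hmemcs _).mpr ⟨u, hu.trans hjn, rfl, heq.trans hgj⟩
    have := hrfst' _ hu' (by rw [hje]; exact_mod_cast hu)
    rw [hje] at this
    simpa [hkey, PySem.List.pyGetD_natCast] using this

-- ===== VERDICT (by name: the statement is the Claim_ definition above) =====
theorem fruits_spec : Claim_equal_fruits := by
  intro a b _hdom _hpre
  unfold Spec_fruits
  by_cases h : a = []
  · subst h; rfl
  · exact goodIdx_unique (fruits_goodIdx h) (fruits_alt_goodIdx h)
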